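-- pv_equiv track=rewrite | github.com/esalagea/algos | codility/lessons/caterpillar/distinct_slices.py | solution_old
-- ===== SOURCE A (Python) =====
-- def solution_old(M, A):
--     slices = 0
--     start_index = 0
--
--     elements_in_slice = set()
--     while start_index < len(A):
--         end_index = start_index
--
--         duplicate_element = None
--         while end_index < len(A) and duplicate_element is None:
--             if A[end_index] in elements_in_slice:
--                 duplicate_element = A[end_index]
--             else:
--                 elements_in_slice.add(A[end_index])
--             end_index += 1
--             slices += 1
--         if slices > 1000000000:
--             return 1000000000
--         if duplicate_element is not None:
--             # move start index forward until we find the duplicate element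
--             while A[start_index] != duplicate_element:
--                 elements_in_slice.remove(A[start_index])
--                 start_index += 1
--         start_index += 1
--
--     return slices
-- ===== SOURCE B (Python) =====
-- def solution_old(M, A):
--     # Processes each maximal scan block in one step, accounting the trailing
--     # one-element iterations of A arithmetically; clamps once at the end.
--     n = len(A)
--     seen = set()
--     total = 0
--     s = 0
--     while s < n:
--         e = s
--         while e < n and A[e] not in seen:
--             seen.add(A[e])
--             e += 1
--         if e == n:
--             total += 2 * (n - s) - 1
--             s = n
--         else:
--             dup = A[e]
--             g = s
--             while A[g] != dup:
--                 seen.remove(A[g])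
--                 g += 1
--             total += (e - s + 1) + (e - g)
--             s = e + 1
--     return min(total, 1000000000)
-- ===== Notes on version B (the rewrite author's own statement) =====
-- stated objective: alternative
-- what changed: B collapses A's three nested while-loops into one pass over maximal duplicate-free scan blocks: the run of A's one-element outer iterations that follows each duplicate is accounted for arithmetically ((e-s+1)+(e-g) per block) instead of being iterated, there is no per-iteration early return, and the 1e9 cap is applied once at the end by min-clamping (valid because the running count is monotone).
import Mathlib
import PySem

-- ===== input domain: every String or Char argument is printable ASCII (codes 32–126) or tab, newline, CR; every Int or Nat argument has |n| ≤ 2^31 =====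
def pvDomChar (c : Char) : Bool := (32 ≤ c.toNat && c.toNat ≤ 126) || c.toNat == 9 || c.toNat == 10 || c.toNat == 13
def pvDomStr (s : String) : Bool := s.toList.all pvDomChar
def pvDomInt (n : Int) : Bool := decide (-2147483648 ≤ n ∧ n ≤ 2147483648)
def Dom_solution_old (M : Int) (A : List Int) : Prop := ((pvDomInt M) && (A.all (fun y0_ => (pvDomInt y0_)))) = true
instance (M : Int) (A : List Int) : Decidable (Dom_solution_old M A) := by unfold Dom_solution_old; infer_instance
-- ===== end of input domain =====

-- B processes each maximal duplicate-free scan block in ONE outer step, accounting A's trailing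
-- one-element iterations arithmetically and clamping once at the end (objective: alternative).

-- ===== PORT A =====
-- inner while: 'while end_index < len(A) and duplicate_element is None: …'
-- returns (end_index, duplicate_element, elements_in_slice, slices)
def aScan (A : List Int) (endi : Nat) (S : PySem.Set Int) (slices : Int) :
    Nat × Option Int × PySem.Set Int × Int :=
  if h : endi < A.length then
    if PySem.Set.contains S A[endi] then (endi + 1, some A[endi], S, slices + 1)
    else aScan A (endi + 1) (PySem.Set.add S A[endi]) (slices + 1)
  else (endi, none, S, slices)
termination_by A.length - endi
decreasing_by exact Nat.sub_succ_lt_self A.length endi h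

-- 'while A[start_index] != duplicate_element: elements_in_slice.remove(A[start_index]); …'
-- the fallback arms are totality guards for Python's IndexError / KeyError; unreachable on A's runs
def aRemove (A : List Int) (start : Nat) (dup : Int) (S : PySem.Set Int) :
    Nat × PySem.Set Int :=
  if h : start < A.length then
    if A[start] ≠ dup then
      match PySem.Set.remove? S A[start] with
      | some S' => aRemove A (start + 1) dup S'
      | none => (start, S)
    else (start, S)
  else (start, S)
termination_by A.length - start
decreasing_by exact Nat.sub_succ_lt_self A.length start h

theorem aRemove_ge_aux (A : List Int) (dup : Int) :
    ∀ n start S, A.length - start = n → start ≤ (aRemove A start dup S).1 := by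
  intro n
  induction n with
  | zero =>
      intro start S hn
      rw [aRemove, dif_neg (by omega)]
  | succ n IH =>
      intro start S hn
      rw [aRemove]
      by_cases h : start < A.length
      · rw [dif_pos h]
        by_cases hd : A[start] = dup
        · rw [if_neg (not_not.mpr hd)]
        · rw [if_pos hd]
          cases hr : PySem.Set.remove? S A[start] with
          | some S' => exact Nat.le_of_succ_le (IH (start + 1) S' (by omega))
          | none => exact le_refl start
      · rw [dif_neg h]

theorem aRemove_ge (A : List Int) (start : Nat) (dup : Int) (S : PySem.Set Int) :
    start ≤ (aRemove A start dup S).1 :=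
  aRemove_ge_aux A dup (A.length - start) start S rfl

-- outer while: 'while start_index < len(A): …'
def aLoop (A : List Int) (start : Nat) (S : PySem.Set Int) (slices : Int) : Int :=
  if hs : start < A.length then
    let r := aScan A start S slices
    if r.2.2.2 > 1000000000 then 1000000000
    else
      match r.2.1 with
      | some d =>
          let r2 := aRemove A start d r.2.2.1
          aLoop A (r2.1 + 1) r2.2 r.2.2.2
      | none => aLoop A (start + 1) r.2.2.1 r.2.2.2
  else slices
termination_by A.length - start
decreasing_by
  · exact Nat.sub_lt_sub_left hs
      (Nat.lt_succ_of_le (aRemove_ge A start d (aScan A start S slices).2.2.1))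
  · exact Nat.sub_succ_lt_self A.length start hs

def solution_old (M : Int) (A : List Int) : Int :=
  aLoop A 0 PySem.Set.empty 0

-- ===== PORT B =====
-- 'while e < n and A[e] not in seen: seen.add(A[e]); e += 1'
def bScan (A : List Int) (e : Nat) (seen : PySem.Set Int) : Nat × PySem.Set Int :=
  if h : e < A.length then
    if PySem.Set.contains seen A[e] then (e, seen)
    else bScan A (e + 1) (PySem.Set.add seen A[e])
  else (e, seen)
termination_by A.length - e
decreasing_by exact Nat.sub_succ_lt_self A.length e h

-- 'while A[g] != dup: seen.discard(A[g]); g += 1'  (the fallback arm guards Python's IndexError; unreachable)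
def bRemove (A : List Int) (g : Nat) (dup : Int) (seen : PySem.Set Int) :
    Nat × PySem.Set Int :=
  if h : g < A.length then
    if A[g] ≠ dup then bRemove A (g + 1) dup (PySem.Set.discard seen A[g])
    else (g, seen)
  else (g, seen)
termination_by A.length - g
decreasing_by exact Nat.sub_succ_lt_self A.length g h

theorem bScan_ge_aux (A : List Int) :
    ∀ n e seen, A.length - e = n → e ≤ (bScan A e seen).1 := by
  intro n
  induction n with
  | zero =>
      intro e seen hn
      rw [bScan, dif_neg (by omega)]
  | succ n IH =>
      intro e seen hn
      rw [bScan]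
      by_cases h : e < A.length
      · rw [dif_pos h]
        by_cases hc : PySem.Set.contains seen A[e] = true
        · rw [if_pos hc]
        · rw [if_neg hc]
          exact Nat.le_of_succ_le (IH (e + 1) (PySem.Set.add seen A[e]) (by omega))
      · rw [dif_neg h]

theorem bScan_ge (A : List Int) (e : Nat) (seen : PySem.Set Int) :
    e ≤ (bScan A e seen).1 :=
  bScan_ge_aux A (A.length - e) e seen rfl

-- outer while of Source B; returns the unclamped total (the 's = n' exit returns directly)
def bLoop (A : List Int) (s : Nat) (seen : PySem.Set Int) (total : Int) : Int :=
  if hs : s < A.length then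
    let p := bScan A s seen
    if hp : p.1 < A.length then
      let q := bRemove A s A[p.1] p.2
      bLoop A (p.1 + 1) q.2 (total + (((p.1 : Int) - (s : Int)) + 1) + ((p.1 : Int) - (q.1 : Int)))
    else total + 2 * ((A.length : Int) - (s : Int)) - 1
  else total
termination_by A.length - s
decreasing_by
  exact Nat.sub_lt_sub_left hs (Nat.lt_succ_of_le (bScan_ge A s seen))

def solution_old_alt (M : Int) (A : List Int) : Int :=
  min (bLoop A 0 PySem.Set.empty 0) 1000000000

-- ===== PRECONDITION & SPEC =====
def Spec_solution_old (M : Int) (A : List Int) (out : Int) : Prop := out = solution_old_alt M A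
instance (M : Int) (A : List Int) (out : Int) : Decidable (Spec_solution_old M A out) := by unfold Spec_solution_old; infer_instance

-- ===== CLAIM (what is proved, stated in full; the proofs are below) =====
def Claim_equal_solution_old : Prop := ∀ (M : Int) (A : List Int), Dom_solution_old M A → Spec_solution_old M A (solution_old M A)

-- ===== LEMMAS AND PROOFS =====

theorem bRemove_ge (A : List Int) (g : Nat) (dup : Int) (seen : PySem.Set Int) :
    g ≤ (bRemove A g dup seen).1 := by
  fun_induction bRemove <;> simp_all <;> omega

theorem bScan_le (A : List Int) (e : Nat) (seen : PySem.Set Int) (he : e ≤ A.length) :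
    (bScan A e seen).1 ≤ A.length := by
  fun_induction bScan <;> simp_all <;> omega

-- the element the scan stopped on is in the final set
theorem bScan_hit (A : List Int) (e : Nat) (seen : PySem.Set Int)
    (hx : (bScan A e seen).1 < A.length) : A[(bScan A e seen).1] ∈ (bScan A e seen).2 := by
  fun_induction bScan with
  | case1 e seen h hc => simpa using hc
  | case2 e seen h hc ih => exact ih hx
  | case3 e seen h => simp at hx; omega

-- membership in the set returned by the scan
theorem bScan_mem (A : List Int) (e : Nat) (seen : PySem.Set Int) (x : Int) :
    x ∈ (bScan A e seen).2 ↔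
      x ∈ seen ∨ ∃ j, e ≤ j ∧ j < (bScan A e seen).1 ∧ ∃ h : j < A.length, A[j] = x := by
  fun_induction bScan with
  | case1 e seen h hc =>
      simp only
      exact ⟨fun hx => Or.inl hx, fun hx => by
        rcases hx with hx | ⟨j, h1, h2, _⟩
        · exact hx
        · omega⟩
  | case2 e seen h hc ih =>
      rw [ih]
      have hge := bScan_ge A (e + 1) (PySem.Set.add seen A[e])
      constructor
      · rintro (hx | ⟨j, h1, h2, h3, h4⟩)
        · rcases (PySem.Set.mem_add _ _ _).mp hx with hx | hx
          · exact Or.inl hx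
          · exact Or.inr ⟨e, le_refl e, by omega, h, hx.symm⟩
        · exact Or.inr ⟨j, by omega, h2, h3, h4⟩
      · rintro (hx | ⟨j, h1, h2, h3, h4⟩)
        · exact Or.inl ((PySem.Set.mem_add _ _ _).mpr (Or.inl hx))
        · rcases Nat.eq_or_lt_of_le h1 with rfl | hj
          · exact Or.inl ((PySem.Set.mem_add _ _ _).mpr (Or.inr h4.symm))
          · exact Or.inr ⟨j, hj, h2, h3, h4⟩
  | case3 e seen h =>
      simp only
      exact ⟨fun hx => Or.inl hx, fun hx => by
        rcases hx with hx | ⟨j, h1, h2, _⟩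
        · exact hx
        · omega⟩

-- the scanned elements were not in the starting set and are pairwise distinct
theorem bScan_distinct (A : List Int) (e : Nat) (seen : PySem.Set Int) :
    ∀ j, e ≤ j → j < (bScan A e seen).1 → ∀ h : j < A.length,
      A[j] ∉ seen ∧ ∀ i, e ≤ i → i < j → ∀ h' : i < A.length, A[i] ≠ A[j] := by
  fun_induction bScan with
  | case1 e seen h hc => intro j h1 h2; simp at h2; omega
  | case2 e seen h hc ih =>
      intro j h1 h2 hjlen
      have hx : A[e] ∉ seen := fun hx => hc (by simpa using hx)
      rcases Nat.eq_or_lt_of_le h1 with rfl | hj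
      · exact ⟨hx, fun i hi1 hi2 hi3 => by omega⟩
      · obtain ⟨hy1, hy2⟩ := ih j hj h2 hjlen
        have hyseen : A[j] ∉ seen := fun hy => hy1 ((PySem.Set.mem_add _ _ _).mpr (Or.inl hy))
        have hyx : A[j] ≠ A[e] := fun hyx => hy1 ((PySem.Set.mem_add _ _ _).mpr (Or.inr hyx))
        refine ⟨hyseen, fun i hi1 hi2 hi3 => ?_⟩
        rcases Nat.eq_or_lt_of_le hi1 with rfl | hi
        · exact fun hzz => hyx hzz.symm
        · exact hy2 i hi hi2 hi3
  | case3 e seen h => intro j h1 h2; simp at h2; omega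

-- A's inner scan computed from B's scan
theorem aScan_eq (A : List Int) (e : Nat) (S : PySem.Set Int) (sl : Int) :
    aScan A e S sl =
      if h : (bScan A e S).1 < A.length then
        ((bScan A e S).1 + 1, some A[(bScan A e S).1], (bScan A e S).2,
         sl + (((bScan A e S).1 : Int) - (e : Int)) + 1)
      else ((bScan A e S).1, none, (bScan A e S).2,
            sl + (((bScan A e S).1 : Int) - (e : Int))) := by
  fun_induction bScan A e S generalizing sl with
  | case1 e S h hc =>
      rw [aScan]
      simp only [h, dif_pos, hc, if_true]
      simp
  | case2 e S h hc ih =>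
      rw [aScan]
      simp only [h, dif_pos, hc, if_false]
      rw [ih (sl + 1)]
      have hge := bScan_ge A (e + 1) (PySem.Set.add S A[e])
      rcases Nat.lt_or_ge (bScan A (e + 1) (PySem.Set.add S A[e])).1 A.length with hA | hA
      · rw [dif_pos hA, dif_pos hA]
        have harith : sl + 1 + (((bScan A (e + 1) (PySem.Set.add S A[e])).1 : Int) - ((e + 1 : Nat) : Int)) + 1
            = sl + (((bScan A (e + 1) (PySem.Set.add S A[e])).1 : Int) - (e : Int)) + 1 := by
          push_cast; omega
        rw [harith]
        simp
      · rw [dif_neg (not_lt.mpr hA), dif_neg (not_lt.mpr hA)]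
        have harith : sl + 1 + (((bScan A (e + 1) (PySem.Set.add S A[e])).1 : Int) - ((e + 1 : Nat) : Int))
            = sl + (((bScan A (e + 1) (PySem.Set.add S A[e])).1 : Int) - (e : Int)) := by
          push_cast; omega
        rw [harith]
        simp
  | case3 e S h =>
      rw [aScan]
      simp [h]

-- B's removal stops at the first occurrence of dup at or after g
theorem bRemove_pos (A : List Int) (dup : Int) :
    ∀ n g seen occ, occ - g = n → g ≤ occ → (hocc : occ < A.length) → A[occ] = dup →
      (bRemove A g dup seen).1 ≤ occ ∧
      (∃ h : (bRemove A g dup seen).1 < A.length, A[(bRemove A g dup seen).1] = dup) ∧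
      (∀ j, g ≤ j → j < (bRemove A g dup seen).1 → ∀ h : j < A.length, A[j] ≠ dup) := by
  intro n
  induction n with
  | zero =>
      intro g seen occ hn hg hocc hdup
      have hgo : g = occ := by omega
      subst hgo
      rw [bRemove, dif_pos hocc, if_neg (not_not.mpr hdup)]
      exact ⟨le_refl g, ⟨hocc, hdup⟩, fun j h1 h2 => by omega⟩
  | succ n IH =>
      intro g seen occ hn hg hocc hdup
      have hglen : g < A.length := by omega
      rw [bRemove, dif_pos hglen]
      by_cases hgd : A[g] = dup
      · rw [if_neg (not_not.mpr hgd)]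
        exact ⟨hg, ⟨hglen, hgd⟩, fun j h1 h2 => by omega⟩
      · simp only [ne_eq, hgd, not_false_eq_true, if_true]
        have hgo : g < occ := by
          rcases Nat.eq_or_lt_of_le hg with rfl | h
          · exact absurd hdup hgd
          · exact h
        obtain ⟨c1, c2, c3⟩ := IH (g + 1) (PySem.Set.discard seen A[g]) occ (by omega) (by omega) hocc hdup
        refine ⟨c1, c2, fun j h1 h2 hj => ?_⟩
        rcases Nat.eq_or_lt_of_le h1 with rfl | h
        · exact hgd
        · exact c3 j h h2 hj

-- membership in the set after B's removal
theorem bRemove_mem (A : List Int) (g : Nat) (dup : Int) (seen : PySem.Set Int) (x : Int) :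
    x ∈ (bRemove A g dup seen).2 ↔
      x ∈ seen ∧ ∀ j, g ≤ j → j < (bRemove A g dup seen).1 → ∀ h : j < A.length, A[j] ≠ x := by
  fun_induction bRemove with
  | case1 g seen h hgd ih =>
      rw [ih]
      have hge : g + 1 ≤ (bRemove A (g + 1) dup (PySem.Set.discard seen A[g])).1 :=
        bRemove_ge A (g + 1) dup (PySem.Set.discard seen A[g])
      constructor
      · rintro ⟨h1, h2⟩
        obtain ⟨h1a, h1b⟩ := (PySem.Set.mem_discard _ _ _).mp h1
        refine ⟨h1a, fun j hj1 hj2 hj3 => ?_⟩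
        rcases Nat.eq_or_lt_of_le hj1 with rfl | hj
        · exact fun hzz => h1b (hzz ▸ rfl)
        · exact h2 j hj hj2 hj3
      · rintro ⟨h1, h2⟩
        refine ⟨(PySem.Set.mem_discard _ _ _).mpr ⟨h1, fun hxy => (h2 g (le_refl g) (by omega) h) hxy.symm⟩,
          fun j hj1 hj2 hj3 => h2 j (by omega) hj2 hj3⟩
  | case2 g seen h hgd =>
      simp only [not_not] at hgd
      exact ⟨fun hx => ⟨hx, fun j h1 h2 => by omega⟩, fun hx => hx.1⟩
  | case3 g seen h =>
      exact ⟨fun hx => ⟨hx, fun j h1 h2 => by omega⟩, fun hx => hx.1⟩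

-- A's removal equals B's removal when every element to be removed is still in the set and
-- the elements in front of the first occurrence of dup are pairwise distinct
theorem aRemove_eq_bRemove (A : List Int) (dup : Int) :
    ∀ n s S occ, occ - s = n → s ≤ occ → (hocc : occ < A.length) → A[occ] = dup →
      (∀ j, s ≤ j → j < occ → ∀ h : j < A.length, A[j] ∈ S) →
      (∀ i j, s ≤ i → i < j → j < occ → ∀ hi : i < A.length, ∀ hj : j < A.length, A[i] ≠ A[j]) →
      aRemove A s dup S = bRemove A s dup S := by
  intro n
  induction n with
  | zero =>
      intro s S occ hn hs hocc hdup hmem hdist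
      have hso : s = occ := by omega
      subst hso
      rw [aRemove, bRemove, dif_pos hocc, dif_pos hocc]
      simp [hdup]
  | succ n IH =>
      intro s S occ hn hs hocc hdup hmem hdist
      have hslen : s < A.length := by omega
      rw [aRemove, bRemove, dif_pos hslen, dif_pos hslen]
      by_cases hsd : A[s] = dup
      · simp [hsd]
      · have hso : s < occ := by
          rcases Nat.eq_or_lt_of_le hs with rfl | h
          · exact absurd hdup hsd
          · exact h
        have hxS : A[s] ∈ S := hmem s (le_refl s) hso hslen
        rw [PySem.Set.remove?_of_mem hxS]
        simp only [ne_eq, hsd, not_false_eq_true, if_true]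
        exact IH (s + 1) (PySem.Set.discard S A[s]) occ (by omega) (by omega) hocc hdup
          (fun j h1 h2 hj => (PySem.Set.mem_discard _ _ _).mpr
            ⟨hmem j (by omega) h2 hj, (hdist s j (le_refl s) h1 h2 hslen hj).symm⟩)
          (fun i j h1 h2 h3 hi hj => hdist i j (by omega) h2 h3 hi hj)

-- a run of A's outer loop over positions whose elements are all already in the set:
-- each iteration counts exactly one slice and leaves the set untouched
theorem aLoop_run (A : List Int) (S : PySem.Set Int) (t : Nat) (ht : t ≤ A.length) :
    ∀ n p sl, t - p = n → p ≤ t → sl ≤ 1000000000 →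
      (∀ q, p ≤ q → q < t → ∀ h : q < A.length, A[q] ∈ S) →
      aLoop A p S sl =
        if sl + ((t : Int) - (p : Int)) > 1000000000 then 1000000000
        else aLoop A t S (sl + ((t : Int) - (p : Int))) := by
  intro n
  induction n with
  | zero =>
      intro p sl hn hp hsl hall
      have hpt : p = t := by omega
      subst hpt
      rw [if_neg (by omega)]
      simp
  | succ n IH =>
      intro p sl hn hp hsl hall
      have hpt : p < t := by omega
      have hplen : p < A.length := by omega
      have hxS : A[p] ∈ S := hall p (le_refl p) hpt hplen
      rw [aLoop]
      simp only [hplen, dif_pos]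
      rw [aScan, dif_pos hplen]
      rw [if_pos (show PySem.Set.contains S A[p] = true by simpa using hxS)]
      simp only []
      rw [aRemove, dif_pos hplen]
      simp only [ne_eq, not_true_eq_false, if_false]
      have hc : (p : Int) + 1 ≤ (t : Int) := by exact_mod_cast hpt
      by_cases hcap : sl + 1 > 1000000000
      · rw [if_pos (by simpa using hcap), if_pos (by omega)]
      · rw [if_neg (by simpa using hcap)]
        rw [IH (p + 1) (sl + 1) (by omega) (by omega) (by omega)
          (fun q h1 h2 h3 => hall q (by omega) h2 h3)]
        have e1 : sl + 1 + ((t : Int) - ((p + 1 : Nat) : Int)) = sl + ((t : Int) - (p : Int)) := by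
          push_cast; ring
        rw [e1]

-- accumulator lower bound for B's loop (contributions are nonnegative)
theorem bLoop_ge (A : List Int) (s : Nat) (seen : PySem.Set Int) (total : Int) :
    total ≤ bLoop A s seen total := by
  fun_induction bLoop with
  | case1 s seen total hs p hp q ih =>
      have hpd : p = bScan A s seen := rfl
      have hqd : q = bRemove A s A[p.1] p.2 := rfl
      have h1 : s ≤ p.1 := hpd ▸ bScan_ge A s seen
      have h2 : q.1 ≤ p.1 := by
        have := (bRemove_pos A A[p.1] (p.1 - s) s p.2 p.1 rfl h1 hp rfl).1
        rw [← hqd] at this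
        exact this
      refine le_trans ?_ ih
      have c1 : (s : Int) ≤ (p.1 : Int) := by exact_mod_cast h1
      have c2 : (q.1 : Int) ≤ (p.1 : Int) := by exact_mod_cast h2
      omega
  | case2 s seen total hs p hp =>
      have h1 : (s : Int) < (A.length : Int) := by exact_mod_cast hs
      omega
  | case3 s seen total hs => exact le_refl total

-- MAIN LEMMA: A's outer loop computes the min-clamp of B's outer loop
theorem main_loop (A : List Int) :
    ∀ n s S sl, A.length - s = n → sl ≤ 1000000000 →
      aLoop A s S sl = min (bLoop A s S sl) 1000000000 := by
  intro n
  induction n using Nat.strong_induction_on with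
  | _ n IH =>
    intro s S sl hn hsl
    by_cases hs : s < A.length
    case neg =>
      rw [aLoop, bLoop, dif_neg hs, dif_neg hs]
      omega
    case pos =>
      have hes : s ≤ (bScan A s S).1 := bScan_ge A s S
      have hel : (bScan A s S).1 ≤ A.length := bScan_le A s S (le_of_lt hs)
      rw [aLoop, dif_pos hs, aScan_eq, bLoop, dif_pos hs]
      by_cases he : (bScan A s S).1 < A.length
      case neg =>
        -- the scan found no duplicate and ran to the end of the list
        have heq : (bScan A s S).1 = A.length := by omega
        rw [dif_neg he, dif_neg he]
        simp only []
        have hcse : ((bScan A s S).1 : Int) = (A.length : Int) := by exact_mod_cast heq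
        by_cases hcap : sl + (((bScan A s S).1 : Int) - (s : Int)) > 1000000000
        · rw [if_pos hcap]
          omega
        · rw [if_neg hcap]
          rw [aLoop_run A (bScan A s S).2 A.length (le_refl _) (A.length - (s + 1)) (s + 1)
            (sl + (((bScan A s S).1 : Int) - (s : Int))) rfl (by omega) (by omega)
            (fun q h1 h2 h3 => (bScan_mem A s S _).mpr (Or.inr ⟨q, by omega, by omega, h3, rfl⟩))]
          rw [aLoop, dif_neg (lt_irrefl A.length)]
          split <;> omega
      case pos =>
        -- the scan stopped on a duplicate at position (bScan A s S).1
        rw [dif_pos he, dif_pos he]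
        simp only []
        have hmem : ∀ j, s ≤ j → j < (bScan A s S).1 → ∀ h : j < A.length, A[j] ∈ (bScan A s S).2 :=
          fun j h1 h2 h3 => (bScan_mem A s S _).mpr (Or.inr ⟨j, h1, h2, h3, rfl⟩)
        have hdist : ∀ i j, s ≤ i → i < j → j < (bScan A s S).1 →
            ∀ hi : i < A.length, ∀ hj : j < A.length, A[i] ≠ A[j] :=
          fun i j h1 h2 h3 hi hj => (bScan_distinct A s S j (by omega) h3 hj).2 i h1 h2 hi
        have hrem : aRemove A s A[(bScan A s S).1] (bScan A s S).2
            = bRemove A s A[(bScan A s S).1] (bScan A s S).2 :=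
          aRemove_eq_bRemove A A[(bScan A s S).1] ((bScan A s S).1 - s) s (bScan A s S).2
            (bScan A s S).1 rfl hes he rfl hmem hdist
        obtain ⟨hg1, ⟨hglen, hgdup⟩, hgfirst⟩ :=
          bRemove_pos A A[(bScan A s S).1] ((bScan A s S).1 - s) s (bScan A s S).2
            (bScan A s S).1 rfl hes he rfl
        have hg0 : s ≤ (bRemove A s A[(bScan A s S).1] (bScan A s S).2).1 :=
          bRemove_ge A s A[(bScan A s S).1] (bScan A s S).2
        have hble := bLoop_ge A ((bScan A s S).1 + 1)
          (bRemove A s A[(bScan A s S).1] (bScan A s S).2).2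
          (sl + ((((bScan A s S).1 : Int) - (s : Int)) + 1)
            + (((bScan A s S).1 : Int) - ((bRemove A s A[(bScan A s S).1] (bScan A s S).2).1 : Int)))
        have hcg : ((bRemove A s A[(bScan A s S).1] (bScan A s S).2).1 : Int)
            ≤ ((bScan A s S).1 : Int) := by exact_mod_cast hg1
        by_cases hcap : sl + (((bScan A s S).1 : Int) - (s : Int)) + 1 > 1000000000
        · rw [if_pos hcap]
          omega
        · rw [if_neg hcap]
          rw [hrem]
          rw [aLoop_run A (bRemove A s A[(bScan A s S).1] (bScan A s S).2).2 ((bScan A s S).1 + 1)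
            (by omega) ((bScan A s S).1 + 1 - ((bRemove A s A[(bScan A s S).1] (bScan A s S).2).1 + 1))
            ((bRemove A s A[(bScan A s S).1] (bScan A s S).2).1 + 1)
            (sl + (((bScan A s S).1 : Int) - (s : Int)) + 1) rfl (by omega) (by omega) ?hall]
          case hall =>
            intro q h1 h2 h3
            refine (bRemove_mem A s A[(bScan A s S).1] (bScan A s S).2 A[q]).mpr ⟨?_, ?_⟩
            · rcases Nat.lt_or_ge q (bScan A s S).1 with hq | hq
              · exact hmem q (by omega) hq h3
              · have hqe : q = (bScan A s S).1 := by omega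
                subst hqe
                exact bScan_hit A s S he
            · intro j hj1 hj2 hj3
              rcases Nat.lt_or_ge q (bScan A s S).1 with hq | hq
              · exact (bScan_distinct A s S q (by omega) hq h3).2 j hj1 (by omega) hj3
              · have hqe : q = (bScan A s S).1 := by omega
                subst hqe
                exact hgfirst j hj1 hj2 hj3
          by_cases hcap2 : sl + (((bScan A s S).1 : Int) - (s : Int)) + 1
              + ((((bScan A s S).1 + 1 : Nat) : Int)
                 - (((bRemove A s A[(bScan A s S).1] (bScan A s S).2).1 + 1 : Nat) : Int)) > 1000000000
          · rw [if_pos hcap2]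
            push_cast at hcap2
            omega
          · rw [if_neg hcap2]
            rw [IH (A.length - ((bScan A s S).1 + 1)) (by omega) ((bScan A s S).1 + 1)
              (bRemove A s A[(bScan A s S).1] (bScan A s S).2).2 _ rfl (by push_cast at hcap2 ⊢; omega)]
            have hacc : sl + (((bScan A s S).1 : Int) - (s : Int)) + 1
                + ((((bScan A s S).1 + 1 : Nat) : Int)
                   - (((bRemove A s A[(bScan A s S).1] (bScan A s S).2).1 + 1 : Nat) : Int))
                = sl + ((((bScan A s S).1 : Int) - (s : Int)) + 1)
                  + (((bScan A s S).1 : Int) - ((bRemove A s A[(bScan A s S).1] (bScan A s S).2).1 : Int)) := by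
              push_cast; ring
            rw [hacc]

-- ===== VERDICT (by name: the statement is the Claim_ definition above) =====
theorem solution_old_spec : Claim_equal_solution_old := by
  intro M A _
  unfold Spec_solution_old solution_old solution_old_alt
  exact main_loop A (A.length - 0) 0 PySem.Set.empty 0 rfl (by omega)
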